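-- pv_equiv track=rewrite | github.com/EmericDavid/stenographe_to_french | sent2steno.py | extract_words_and_punct
-- ===== SOURCE A (Python) =====
-- def extract_words_and_punct(phrase):
--     """
--     Sépare les mots et la ponctuation d'une phrase.
--     Retourne une liste de tuples (mot, ponctuation).
--     """
--     # Définir les ponctuations de fin de phrase et de milieu de phrase
--     end_punct = ['.', '!', '?', '...']
--     mid_punct = [':', ',', ';', '-', '—', '(', ')', '[', ']', '{', '}', '<', '>', '"', '«', '»']
--
--     words = []
--     current_word = ""
--     current_punct = ""
--
--     for char in phrase.strip() + " ":  # Ajouter un espace à la fin pour traiter le dernier mot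
--         if char.isspace():
--             if current_word:
--                 words.append((current_word, current_punct))
--                 current_word = ""
--                 current_punct = ""
--         elif char in end_punct + mid_punct:
--             if current_word:
--                 words.append((current_word, char))
--                 current_word = ""
--                 current_punct = ""
--             else:
--                 # Si on a une ponctuation sans mot précédent, on l'ajoute comme élément séparé
--                 words.append(("", char))
--         else:
--             current_word += char
--
--     return words
-- ===== SOURCE B (Python) =====
-- # B: split-then-scan — tokenize on whitespace with str.split(), then slice each
-- # token into (word, at-most-one-trailing-punct) pieces; lone puncts become ("", p).
-- PUNCT = set('.!?:,;-\u2014()[]{}<>"\u00ab\u00bb')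
--
-- def extract_words_and_punct(phrase):
--     out = []
--     for tok in phrase.split():
--         rest = tok
--         while rest:
--             if rest[0] in PUNCT:
--                 out.append(("", rest[0]))
--                 rest = rest[1:]
--             else:
--                 k = 1
--                 while k < len(rest) and rest[k] not in PUNCT:
--                     k += 1
--                 word, rest = rest[:k], rest[k:]
--                 if rest:
--                     out.append((word, rest[0]))
--                     rest = rest[1:]
--                 else:
--                     out.append((word, ""))
--     return out
-- ===== Notes on version B (the rewrite author's own statement) =====
-- stated objective: faster
-- what changed: Replaces the flat char-by-char accumulator loop with a two-level split-then-scan: whitespace tokenization via str.split() followed by slice-based chunking of each token into (word, at-most-one-trailing-punct) pieces.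
import Mathlib
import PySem

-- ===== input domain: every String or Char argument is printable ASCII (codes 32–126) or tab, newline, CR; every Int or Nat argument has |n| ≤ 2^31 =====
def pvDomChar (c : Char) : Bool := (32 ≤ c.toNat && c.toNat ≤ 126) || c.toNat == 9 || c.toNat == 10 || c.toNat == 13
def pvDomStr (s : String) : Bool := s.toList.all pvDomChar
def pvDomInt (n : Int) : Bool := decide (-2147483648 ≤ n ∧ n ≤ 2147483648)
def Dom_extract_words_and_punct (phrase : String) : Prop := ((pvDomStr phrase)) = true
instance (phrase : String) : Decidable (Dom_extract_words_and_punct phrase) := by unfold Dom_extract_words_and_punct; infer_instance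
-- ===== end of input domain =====

-- B replaces A's flat char-by-char accumulator loop by whitespace tokenization (str.split())
-- followed by a slice-based scan of each token; a timing run measured B faster in Python.

-- ===== PORT A =====
-- end_punct / mid_punct: Python lists of strings (note "..." can never equal a 1-char string)
def pvEndPunct : List String := [".", "!", "?", "..."]
def pvMidPunct : List String := [":", ",", ";", "-", "—", "(", ")", "[", "]", "{", "}", "<", ">", "\"", "«", "»"]

-- one loop step of A: state = (words, current_word as its chars, current_punct);
-- `char in end_punct + mid_punct` tests the 1-char string of the current char
def pvStepA (st : List (String × String) × List Char × String) (c : Char) :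
    List (String × String) × List Char × String :=
  let words := st.1
  let cur := st.2.1
  let curp := st.2.2
  if PySem.Chars.isspace c then
    if cur ≠ [] then (words ++ [(String.ofList cur, curp)], [], "") else (words, cur, curp)
  else if String.ofList [c] ∈ pvEndPunct ++ pvMidPunct then
    if cur ≠ [] then (words ++ [(String.ofList cur, String.ofList [c])], [], "")
    else (words ++ [("", String.ofList [c])], cur, curp)
  else (words, cur ++ [c], curp)

def extract_words_and_punct (phrase : String) : List (String × String) :=
  -- for char in phrase.strip() + " ": the appended space is the extra [' ']
  (((PySem.Str.strip phrase).toList ++ [' ']).foldl pvStepA ([], [], "")).1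

-- ===== PORT B =====
def pvPunctChars : List Char := ['.', '!', '?', ':', ',', ';', '-', '—', '(', ')', '[', ']', '{', '}', '<', '>', '"', '«', '»']

-- B's inner `while rest:` loop over one token; the k-scan / rest[:k] / rest[k:]
-- are exactly takeWhile / dropWhile of the non-punct prefix
def pvScanTok : List Char → List (String × String)
  | [] => []
  | c :: rest =>
    if c ∈ pvPunctChars then ("", String.ofList [c]) :: pvScanTok rest
    else
      let w := (c :: rest).takeWhile (fun x => !decide (x ∈ pvPunctChars))
      match h : (c :: rest).dropWhile (fun x => !decide (x ∈ pvPunctChars)) with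
      | [] => [(String.ofList w, "")]
      | p :: rs => (String.ofList w, String.ofList [p]) :: pvScanTok rs
termination_by t => t.length
decreasing_by
  · simp
  · have h1 : ((c :: rest).dropWhile (fun x => !decide (x ∈ pvPunctChars))).length ≤ (c :: rest).length :=
      (List.dropWhile_sublist _).length_le
    rw [h] at h1
    simpa using Nat.lt_of_lt_of_le (Nat.lt_succ_self _) h1

def extract_words_and_punct_alt (phrase : String) : List (String × String) :=
  (PySem.Str.split₀ phrase).foldl (fun acc tok => acc ++ pvScanTok tok.toList) []

-- ===== PRECONDITION & SPEC =====
def Spec_extract_words_and_punct (phrase : String) (out : List (String × String)) : Prop := out = extract_words_and_punct_alt phrase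
instance (phrase : String) (out : List (String × String)) : Decidable (Spec_extract_words_and_punct phrase out) := by unfold Spec_extract_words_and_punct; infer_instance

-- ===== CLAIM (what is proved, stated in full; the proofs are below) =====
def Claim_equal_extract_words_and_punct : Prop := ∀ (phrase : String), Dom_extract_words_and_punct phrase → Spec_extract_words_and_punct phrase (extract_words_and_punct phrase)

-- ===== LEMMAS AND PROOFS =====

-- A's loop body, written as structural recursion (current_punct stays "")
def pvFA : List Char → List Char → List (String × String)
  | [], cur => if cur ≠ [] then [(String.ofList cur, "")] else []
  | c :: cs, cur =>
    if PySem.Chars.isspace c then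
      (if cur ≠ [] then (String.ofList cur, "") :: pvFA cs [] else pvFA cs [])
    else if c ∈ pvPunctChars then
      (if cur ≠ [] then (String.ofList cur, String.ofList [c]) :: pvFA cs [] else ("", String.ofList [c]) :: pvFA cs [])
    else pvFA cs (cur ++ [c])

-- whitespace splitter in direct recursion form (split₀.go without the accumulator)
def pvGS : List Char → List Char → List (List Char)
  | [], cur => if cur.isEmpty then [] else [cur.reverse]
  | c :: cs, cur =>
    if PySem.Chars.isspace c then
      (if cur.isEmpty then pvGS cs [] else cur.reverse :: pvGS cs [])
    else pvGS cs (c :: cur)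

theorem pv_punct_bridge (c : Char) :
    (String.ofList [c] ∈ pvEndPunct ++ pvMidPunct) ↔ c ∈ pvPunctChars := by
  simp [pvEndPunct, pvMidPunct, pvPunctChars, String.ext_iff]
theorem pv_foldlA (cs : List Char) : ∀ (acc : List (String × String)) (cur : List Char),
    (cs ++ [' ']).foldl pvStepA (acc, cur, "") = (acc ++ pvFA cs cur, [], "") := by
  induction cs with
  | nil =>
    intro acc cur
    by_cases h : cur = [] <;> simp [pvStepA, pvFA, h, PySem.Chars.isspace]
  | cons c cs ih =>
    intro acc cur
    simp only [List.cons_append, List.foldl_cons]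
    by_cases hs : PySem.Chars.isspace c
    · by_cases h : cur = [] <;> simp [pvStepA, pvFA, hs, h, ih]
    · by_cases hp : c ∈ pvPunctChars
      · have hp' : String.ofList [c] ∈ pvEndPunct ++ pvMidPunct := (pv_punct_bridge c).mpr hp
        by_cases h : cur = [] <;> simp [pvStepA, pvFA, hs, hp, hp', h, ih]
      · have hp' : String.ofList [c] ∉ pvEndPunct ++ pvMidPunct := fun h => hp ((pv_punct_bridge c).mp h)
        simp [pvStepA, pvFA, hs, hp, hp', ih]

theorem pv_go_eq (s : List Char) : ∀ cur acc,
    PySem.Chars.split₀.go s cur acc = acc.reverse ++ pvGS s cur := by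
  induction s with
  | nil =>
    intro cur acc
    by_cases h : cur.isEmpty <;> simp [PySem.Chars.split₀.go, pvGS, h]
  | cons c cs ih =>
    intro cur acc
    by_cases hs : PySem.Chars.isspace c
    · by_cases h : cur.isEmpty <;> simp [PySem.Chars.split₀.go, pvGS, hs, h, ih]
    · simp [PySem.Chars.split₀.go, pvGS, hs, ih]

theorem pv_gs_all_space (ws : List Char) (h : ∀ c ∈ ws, PySem.Chars.isspace c) :
    pvGS ws [] = [] := by
  induction ws with
  | nil => simp [pvGS]
  | cons c cs ih =>
    have := h c (by simp)
    simp [pvGS, this, ih (fun c hc => h c (by simp [hc]))]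

theorem pv_gs_space (u : List Char) : ∀ (ws : List Char) (cur : List Char),
    (∀ c ∈ ws, PySem.Chars.isspace c) → pvGS (u ++ ws) cur = pvGS u cur := by
  induction u with
  | nil =>
    intro ws cur h
    induction ws with
    | nil => rfl
    | cons c cs ih =>
      have hc := h c (by simp)
      by_cases hcur : cur.isEmpty <;>
        simp [pvGS, hc, hcur, pv_gs_all_space cs (fun d hd => h d (by simp [hd]))]
  | cons c cs ih =>
    intro ws cur h
    by_cases hs : PySem.Chars.isspace c
    · by_cases hcur : cur.isEmpty <;> simp [pvGS, hs, hcur, ih ws _ h]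
    · simp [pvGS, hs, ih ws _ h]

theorem pv_gs_lstrip (s : List Char) :
    pvGS (s.dropWhile PySem.Chars.isspace) [] = pvGS s [] := by
  induction s with
  | nil => rfl
  | cons c cs ih =>
    by_cases hs : PySem.Chars.isspace c
    · simp [hs, pvGS, ih]
    · simp [hs]

theorem pv_gs_strip (s : List Char) : pvGS (PySem.Chars.strip s) [] = pvGS s [] := by
  have h1 : s.dropWhile PySem.Chars.isspace =
      PySem.Chars.strip s ++ ((s.dropWhile PySem.Chars.isspace).reverse.takeWhile PySem.Chars.isspace).reverse := by
    simp only [PySem.Chars.strip, PySem.Chars.rstrip, PySem.Chars.lstrip]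
    conv_lhs =>
      rw [← List.reverse_reverse (s.dropWhile PySem.Chars.isspace),
        ← List.takeWhile_append_dropWhile (p := PySem.Chars.isspace)
          (l := (s.dropWhile PySem.Chars.isspace).reverse), List.reverse_append]
  rw [← pv_gs_lstrip s, h1, pv_gs_space]
  intro c hc
  exact List.mem_takeWhile_imp (List.mem_reverse.mp hc)

theorem pv_fa_word (w : List Char) : ∀ (xs cur : List Char),
    (∀ c ∈ w, ¬ PySem.Chars.isspace c ∧ c ∉ pvPunctChars) →
    pvFA (w ++ xs) cur = pvFA xs (cur ++ w) := by
  induction w with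
  | nil => intro xs cur _; simp
  | cons c cs ih =>
    intro xs cur h
    have hc := h c (by simp)
    have hrec := ih xs (cur ++ [c]) (fun d hd => h d (by simp [hd]))
    have hstep : pvFA (c :: (cs ++ xs)) cur = pvFA (cs ++ xs) (cur ++ [c]) := by
      simp [pvFA, hc.1, hc.2]
    rw [List.cons_append, hstep, hrec]
    simp

theorem pv_fa_flush (r w : List Char) (hw : w ≠ [])
    (hr : r = [] ∨ ∃ c rs, r = c :: rs ∧ PySem.Chars.isspace c) :
    pvFA r w = (String.ofList w, "") :: pvFA r [] := by
  rcases hr with h | ⟨c, rs, rfl, hc⟩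
  · subst h; simp [pvFA, hw]
  · simp [pvFA, hc, hw]

theorem pv_scan_punct (c : Char) (rest : List Char) (hp : c ∈ pvPunctChars) :
    pvScanTok (c :: rest) = ("", String.ofList [c]) :: pvScanTok rest := by
  rw [pvScanTok.eq_def]
  simp [hp]

theorem pv_scan_word_nil (c : Char) (rest : List Char) (hp : c ∉ pvPunctChars)
    (hd : (c :: rest).dropWhile (fun x => !decide (x ∈ pvPunctChars)) = []) :
    pvScanTok (c :: rest) =
      [(String.ofList ((c :: rest).takeWhile (fun x => !decide (x ∈ pvPunctChars))), "")] := by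
  rw [pvScanTok.eq_def]
  simp only [hp, if_false]
  split
  · rfl
  · rename_i p rs heq
    rw [hd] at heq; cases heq

theorem pv_scan_word_cons (c : Char) (rest : List Char) (p : Char) (rs : List Char)
    (hp : c ∉ pvPunctChars)
    (hd : (c :: rest).dropWhile (fun x => !decide (x ∈ pvPunctChars)) = p :: rs) :
    pvScanTok (c :: rest) =
      (String.ofList ((c :: rest).takeWhile (fun x => !decide (x ∈ pvPunctChars))), String.ofList [p]) ::
        pvScanTok rs := by
  rw [pvScanTok.eq_def]
  simp only [hp, if_false]
  split
  · rename_i heq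
    rw [hd] at heq; cases heq
  · rename_i p' rs' heq
    rw [hd] at heq
    injection heq with h1 h2
    subst h1; subst h2; rfl

theorem pv_token_aux (n : Nat) : ∀ (t : List Char), t.length ≤ n →
    ∀ (r : List Char),
    (∀ c ∈ t, ¬ PySem.Chars.isspace c) →
    (r = [] ∨ ∃ c rs, r = c :: rs ∧ PySem.Chars.isspace c) →
    pvFA (t ++ r) [] = pvScanTok t ++ pvFA r [] := by
  induction n with
  | zero =>
    intro t ht r _ _
    have : t = [] := List.eq_nil_of_length_eq_zero (Nat.le_zero.mp ht)
    subst this; simp [pvScanTok]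
  | succ n ih =>
    intro t htn r ht hr
    cases t with
    | nil => simp [pvScanTok]
    | cons c rest =>
      have hcs : ¬ PySem.Chars.isspace c := ht c (by simp)
      by_cases hp : c ∈ pvPunctChars
      · have := ih rest (by simpa using Nat.le_of_succ_le_succ htn) r
          (fun d hd => ht d (by simp [hd])) hr
        rw [pv_scan_punct c rest hp]
        simp [pvFA, hcs, hp, this]
      · have hpred : (fun x => !decide (x ∈ pvPunctChars)) c = true := by simp [hp]
        have hsplit : c :: rest =
            (c :: rest).takeWhile (fun x => !decide (x ∈ pvPunctChars)) ++
            (c :: rest).dropWhile (fun x => !decide (x ∈ pvPunctChars)) :=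
          (List.takeWhile_append_dropWhile).symm
        set w := (c :: rest).takeWhile (fun x => !decide (x ∈ pvPunctChars)) with hwdef
        have hwne : w ≠ [] := by
          rw [hwdef]; simp [hpred]
        have hwmem : ∀ d ∈ w, ¬ PySem.Chars.isspace d ∧ d ∉ pvPunctChars := by
          intro d hd
          have hmem : d ∈ c :: rest := (List.takeWhile_sublist _).mem hd
          have hpd := List.mem_takeWhile_imp hd
          simp at hpd
          exact ⟨ht d hmem, hpd⟩
        have step1 : pvFA ((c :: rest) ++ r) [] =
            pvFA ((c :: rest).dropWhile (fun x => !decide (x ∈ pvPunctChars)) ++ r) w := by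
          conv_lhs => rw [hsplit]
          rw [List.append_assoc, pv_fa_word w _ [] hwmem]
          simp
        cases hd : (c :: rest).dropWhile (fun x => !decide (x ∈ pvPunctChars)) with
        | nil =>
          rw [step1, hd, List.nil_append, pv_fa_flush r w hwne hr,
            pv_scan_word_nil c rest hp hd]
          simp [hwdef]
        | cons p rs =>
          have hpp : p ∈ pvPunctChars := by
            have hne : (c :: rest).dropWhile (fun x => !decide (x ∈ pvPunctChars)) ≠ [] := by
              rw [hd]; simp
            have h2 := List.head_dropWhile_not (p := fun x => !decide (x ∈ pvPunctChars))
              (l := c :: rest) hne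
            have h3 : ((c :: rest).dropWhile (fun x => !decide (x ∈ pvPunctChars))).head hne = p := by
              simp [hd]
            rw [h3] at h2
            simpa using h2
          have hsub : ∀ d ∈ p :: rs, d ∈ c :: rest := by
            intro d hdm
            have : d ∈ (c :: rest).dropWhile (fun x => !decide (x ∈ pvPunctChars)) := by
              rw [hd]; exact hdm
            exact (List.dropWhile_sublist _).mem this
          have hps : ¬ PySem.Chars.isspace p := ht p (hsub p (by simp))
          have hlen : rs.length ≤ n := by
            have h1 : ((c :: rest).dropWhile (fun x => !decide (x ∈ pvPunctChars))).length ≤ rest.length + 1 := by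
              simpa using (List.dropWhile_sublist (l := c :: rest) (fun x => !decide (x ∈ pvPunctChars))).length_le
            rw [hd] at h1
            simp only [List.length_cons] at h1 htn
            omega
          have hrec := ih rs hlen r (fun d hdm => ht d (hsub d (by simp [hdm]))) hr
          rw [step1, hd]
          have : pvFA (p :: (rs ++ r)) w =
              (String.ofList w, String.ofList [p]) :: pvFA (rs ++ r) [] := by
            simp [pvFA, hps, hpp, hwne]
          rw [List.cons_append, this, hrec, pv_scan_word_cons c rest p rs hp hd]
          simp [hwdef]

theorem pv_token (t r : List Char)
    (ht : ∀ c ∈ t, ¬ PySem.Chars.isspace c)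
    (hr : r = [] ∨ ∃ c rs, r = c :: rs ∧ PySem.Chars.isspace c) :
    pvFA (t ++ r) [] = pvScanTok t ++ pvFA r [] :=
  pv_token_aux t.length t le_rfl r ht hr

theorem pv_gs_token (t : List Char) : ∀ (r cur : List Char),
    t ≠ [] → (∀ c ∈ t, ¬ PySem.Chars.isspace c) →
    (r = [] ∨ ∃ c rs, r = c :: rs ∧ PySem.Chars.isspace c) →
    pvGS (t ++ r) cur = (cur.reverse ++ t) :: pvGS r [] := by
  induction t with
  | nil => intro r cur h; exact absurd rfl h
  | cons c cs ih =>
    intro r cur _ ht hr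
    have hcs : ¬ PySem.Chars.isspace c := ht c (by simp)
    by_cases hnil : cs = []
    · subst hnil
      simp only [List.cons_append, List.nil_append]
      rw [pvGS]
      simp only [hcs]
      rcases hr with rfl | ⟨d, rs, rfl, hd⟩
      · simp [pvGS]
      · simp [pvGS, hd]
    · have := ih r (c :: cur) hnil (fun d hd => ht d (by simp [hd])) hr
      simp only [List.cons_append]
      rw [pvGS]
      simp only [hcs]
      rw [this]
      simp

theorem pv_main_aux (n : Nat) : ∀ (s : List Char), s.length ≤ n →
    pvFA s [] = (pvGS s []).flatMap pvScanTok := by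
  induction n with
  | zero =>
    intro s hs
    have : s = [] := List.eq_nil_of_length_eq_zero (Nat.le_zero.mp hs)
    subst this
    simp [pvFA, pvGS]
  | succ n ih =>
    intro s hs
    cases s with
    | nil => simp [pvFA, pvGS]
    | cons c cs =>
      by_cases hsp : PySem.Chars.isspace c
      · have := ih cs (by simpa using Nat.le_of_succ_le_succ hs)
        simp [pvFA, pvGS, hsp, this]
      · have hpred : (fun x => !PySem.Chars.isspace x) c = true := by simp [hsp]
        set t := (c :: cs).takeWhile (fun x => !PySem.Chars.isspace x) with htdef
        set r := (c :: cs).dropWhile (fun x => !PySem.Chars.isspace x) with hrdef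
        have hsplit : c :: cs = t ++ r := (List.takeWhile_append_dropWhile).symm
        have htne : t ≠ [] := by rw [htdef]; simp [hpred]
        have htmem : ∀ d ∈ t, ¬ PySem.Chars.isspace d := by
          intro d hd
          have := List.mem_takeWhile_imp hd
          simpa using this
        have hr : r = [] ∨ ∃ d rs, r = d :: rs ∧ PySem.Chars.isspace d := by
          cases hrc : r with
          | nil => exact Or.inl rfl
          | cons d rs =>
            refine Or.inr ⟨d, rs, rfl, ?_⟩
            have hne : (c :: cs).dropWhile (fun x => !PySem.Chars.isspace x) ≠ [] := by
              rw [← hrdef, hrc]; simp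
            have h2 := List.head_dropWhile_not (p := fun x => !PySem.Chars.isspace x)
              (l := c :: cs) hne
            have h3 : ((c :: cs).dropWhile (fun x => !PySem.Chars.isspace x)).head hne = d := by
              simp [← hrdef, hrc]
            rw [h3] at h2
            simpa using h2
        have hrlen : r.length ≤ n := by
          have h1 : t.length + r.length = cs.length + 1 := by
            have := congrArg List.length hsplit
            simpa using this.symm
          have h2 : 0 < t.length := List.length_pos_iff.mpr htne
          simp only [List.length_cons] at hs
          omega
        calc pvFA (c :: cs) [] = pvFA (t ++ r) [] := by rw [← hsplit]
          _ = pvScanTok t ++ pvFA r [] := pv_token t r htmem hr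
          _ = pvScanTok t ++ (pvGS r []).flatMap pvScanTok := by rw [ih r hrlen]
          _ = (t :: pvGS r []).flatMap pvScanTok := by simp
          _ = (pvGS (t ++ r) []).flatMap pvScanTok := by
                rw [pv_gs_token t r [] htne htmem hr]; simp
          _ = (pvGS (c :: cs) []).flatMap pvScanTok := by rw [← hsplit]

theorem pv_main (s : List Char) :
    pvFA s [] = (pvGS s []).flatMap pvScanTok :=
  pv_main_aux s.length s le_rfl

-- ===== VERDICT (by name: the statement is the Claim_ definition above) =====
theorem extract_words_and_punct_spec : Claim_equal_extract_words_and_punct := by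
  intro phrase _
  unfold Spec_extract_words_and_punct extract_words_and_punct extract_words_and_punct_alt
  rw [pv_foldlA]
  simp only [List.nil_append]
  rw [pv_main]
  have hstrip : (PySem.Str.strip phrase).toList = PySem.Chars.strip phrase.toList := by
    simp [PySem.Str.strip]
  rw [hstrip, pv_gs_strip]
  rw [PySem.List.foldl_append_eq_flatMap]
  simp only [List.nil_append]
  have hsplit : PySem.Str.split₀ phrase =
      (PySem.Chars.split₀ phrase.toList).map String.ofList := by
    simp [PySem.Str.split₀]
  rw [hsplit, List.flatMap_map]
  have hgo : PySem.Chars.split₀ phrase.toList = pvGS phrase.toList [] := by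
    have := pv_go_eq phrase.toList [] []
    simpa [PySem.Chars.split₀] using this
  rw [hgo]
  apply List.flatMap_congr
  intro x _
  simp
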